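-- pv_equiv track=rewrite | github.com/VasilevDenis/testing | task1.py | get_unique_names
-- ===== SOURCE A (Python) =====
-- def get_unique_names(mentors):
--     # добавьте в список всех преподавателей со всех курсов
--     all_list = []
--     for m in mentors:
--         for name in m:
--             all_list.append(name)
--
--     # сделайте список all_names_list, состоящий только из имен, и заполните его
--     all_names_list = []
--     for mentor in all_list:
--         name = mentor.split(' ')[0]
--         all_names_list.append(name)
--
--     # сделайте так, чтобы остались только уникальные имена (без повторений) - допишите ниже ваш код
--     unique_names = set(all_names_list)
--
--     # теперь нужно отсортировать имена в алфавитном порядке. подсказка: используйте sorted() для списка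
--     # допишите код ниже
--     all_names_sorted = sorted(unique_names)
--     # допишите конструкцию вывода результата. можете использовать string.join()
--     # результат будет в all_names_sorted
--     sorted_unique_names = ', '.join(all_names_sorted)
--     answer = f'Уникальные имена преподавателей: {sorted_unique_names}'
--     return answer
-- ===== SOURCE B (Python) =====
-- def get_unique_names(mentors):
--     # flat list of first names in one comprehension
--     names = [mentor.split(' ')[0] for m in mentors for mentor in m]
--     # sort WITH duplicates, then drop adjacent duplicates in one scan
--     names.sort()
--     out = []
--     for n in names:
--         if not out or out[-1] != n:
--             out.append(n)
--     return f'Уникальные имена преподавателей: {", ".join(out)}'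
-- ===== Notes on version B (the rewrite author's own statement) =====
-- stated objective: alternative
-- what changed: Deduplication via set() is replaced by sorting the full multiset of first names and removing adjacent duplicates in a single scan over the sorted list.
import Mathlib
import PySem

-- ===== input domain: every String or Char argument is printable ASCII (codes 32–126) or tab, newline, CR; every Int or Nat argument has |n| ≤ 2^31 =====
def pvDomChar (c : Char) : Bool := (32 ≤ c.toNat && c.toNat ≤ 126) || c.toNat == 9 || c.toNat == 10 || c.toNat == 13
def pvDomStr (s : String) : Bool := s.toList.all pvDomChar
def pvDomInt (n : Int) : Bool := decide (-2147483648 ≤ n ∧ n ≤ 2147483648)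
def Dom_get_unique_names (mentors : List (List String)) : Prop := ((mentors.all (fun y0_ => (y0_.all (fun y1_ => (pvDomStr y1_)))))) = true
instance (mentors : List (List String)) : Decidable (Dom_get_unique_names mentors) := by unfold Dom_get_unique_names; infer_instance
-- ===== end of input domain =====

-- B replaces set() deduplication with sort-then-adjacent-dedup (alternative decomposition, same cost).

-- ===== PORT A =====
-- mentor.split(' ')[0]: split with the non-empty separator " " always succeeds and
-- yields a non-empty list, so [0] is its head; both defaults are unreachable (exact).
def pvFirstName (mentor : String) : String := ((PySem.Str.split? mentor " ").getD []).headD ""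

def get_unique_names (mentors : List (List String)) : String :=
  let all_list := mentors.foldl (fun acc m => m.foldl (fun acc2 name => acc2 ++ [name]) acc) []
  let all_names_list := all_list.foldl (fun acc mentor => acc ++ [pvFirstName mentor]) []
  let unique_names := PySem.Set.ofList all_names_list
  let all_names_sorted := PySem.List.sorted unique_names (fun x => x) false
  let sorted_unique_names := PySem.Str.join ", " all_names_sorted
  "Уникальные имена преподавателей: " ++ sorted_unique_names

-- ===== PORT B =====
def get_unique_names_alt (mentors : List (List String)) : String :=
  let names := mentors.flatMap (fun m => m.map (fun mentor => pvFirstName mentor))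
  let sortedNames := PySem.List.sorted names (fun x => x) false
  let out := sortedNames.foldl
    (fun out n => if out = [] ∨ out.getLast? ≠ some n then out ++ [n] else out) []
  "Уникальные имена преподавателей: " ++ PySem.Str.join ", " out

-- ===== PRECONDITION & SPEC =====
def Spec_get_unique_names (mentors : List (List String)) (out : String) : Prop := out = get_unique_names_alt mentors
instance (mentors : List (List String)) (out : String) : Decidable (Spec_get_unique_names mentors out) := by unfold Spec_get_unique_names; infer_instance

-- ===== CLAIM (what is proved, stated in full; the proofs are below) =====
def Claim_equal_get_unique_names : Prop := ∀ (mentors : List (List String)), Dom_get_unique_names mentors → Spec_get_unique_names mentors (get_unique_names mentors)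

-- ===== LEMMAS AND PROOFS =====

theorem pv_foldl_app_sing {α β : Type} (f : α → β) (l : List α) (acc : List β) :
    l.foldl (fun a x => a ++ [f x]) acc = acc ++ l.map f := by
  induction l generalizing acc with
  | nil => simp
  | cons x xs ih => simp [List.foldl_cons, ih]

theorem pv_foldl_flat {α : Type} (ls : List (List α)) (acc : List α) :
    ls.foldl (fun acc m => m.foldl (fun a n => a ++ [n]) acc) acc = acc ++ ls.flatten := by
  induction ls generalizing acc with
  | nil => simp
  | cons m ms ih =>
      simp only [List.foldl_cons, ih]
      rw [pv_foldl_app_sing (fun x => x)]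
      simp

-- A's two append-loops build exactly B's flat comprehension list
theorem pv_names_eq (mentors : List (List String)) :
    ((mentors.foldl (fun acc m => m.foldl (fun acc2 name => acc2 ++ [name]) acc) []).foldl
      (fun acc mentor => acc ++ [pvFirstName mentor]) [])
    = mentors.flatMap (fun m => m.map (fun mentor => pvFirstName mentor)) := by
  rw [pv_foldl_flat, pv_foldl_app_sing]
  simp [List.flatMap_def, List.map_flatten]

-- in a strictly increasing list every member is ≤ the last element
theorem pv_le_getLast : ∀ (out : List String), out.Pairwise (· < ·) →
    ∀ z ∈ out, ∀ l, out.getLast? = some l → z ≤ l := by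
  intro out
  induction out with
  | nil => intro _ z hz; simp at hz
  | cons a t ih =>
      intro hp z hz l hl
      rcases List.pairwise_cons.mp hp with ⟨ha, ht⟩
      cases t with
      | nil =>
          simp at hl hz; subst hl; subst hz; exact le_refl _
      | cons b u =>
          rw [List.getLast?_cons_cons] at hl
          have hlm : l ∈ b :: u := by
            have := List.mem_of_getLast? (l := b :: u) hl
            exact this
          rcases List.mem_cons.mp hz with hza | hzt
          · subst hza; exact le_of_lt (ha l hlm)
          · exact ih ht z hzt l hl

-- adjacent-dedup over a sorted run coincides with the Set.add fold, given the loop invariant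
theorem pv_adj_eq_add : ∀ (s out : List String),
    s.Pairwise (· ≤ ·) → out.Pairwise (· < ·) →
    (∀ y ∈ s, ∀ z ∈ out, z ≤ y) →
    s.foldl (fun out n => if out = [] ∨ out.getLast? ≠ some n then out ++ [n] else out) out
    = s.foldl PySem.Set.add out := by
  intro s
  induction s with
  | nil => intro out _ _ _; rfl
  | cons n rest ih =>
      intro out hs ho hinv
      rcases List.pairwise_cons.mp hs with ⟨hn, hrest⟩
      by_cases hmem : n ∈ out
      · -- the last element of out must be n, so neither side appends
        have hne : out ≠ [] := List.ne_nil_of_mem hmem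
        obtain ⟨l, hl⟩ := List.getLast?_isSome.mpr hne |> Option.isSome_iff_exists.mp
        have hlm : l ∈ out := List.mem_of_getLast? hl
        have h1 : n ≤ l := pv_le_getLast out ho n hmem l hl
        have h2 : l ≤ n := hinv n (by simp) l hlm
        have hln : l = n := le_antisymm h2 h1
        subst hln
        have hcond : ¬ (out = [] ∨ out.getLast? ≠ some l) := by
          rintro (h | h)
          · exact hne h
          · exact h hl
        have hadd : PySem.Set.add out l = out := by
          simp [PySem.Set.add, hmem]
        simp only [List.foldl_cons, if_neg hcond, hadd]
        exact ih out hrest ho (fun y hy z hz => hinv y (List.mem_cons_of_mem _ hy) z hz)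
      · -- n is new: both sides append it
        have hcond : out = [] ∨ out.getLast? ≠ some n := by
          cases out with
          | nil => exact Or.inl rfl
          | cons a t =>
              right
              intro hl
              exact hmem (List.mem_of_getLast? hl)
        have hadd : PySem.Set.add out n = out ++ [n] := by
          simp [PySem.Set.add, hmem]
        have ho' : (out ++ [n]).Pairwise (· < ·) := by
          rw [List.pairwise_append]
          refine ⟨ho, List.pairwise_singleton _ _, ?_⟩
          intro z hz b hb
          obtain rfl : b = n := List.mem_singleton.mp hb
          exact lt_of_le_of_ne (hinv b (by simp) z hz)
            (fun h => hmem (h ▸ hz))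
        have hinv' : ∀ y ∈ rest, ∀ z ∈ out ++ [n], z ≤ y := by
          intro y hy z hz
          rcases List.mem_append.mp hz with hz1 | hz2
          · exact hinv y (List.mem_cons_of_mem _ hy) z hz1
          · rw [List.mem_singleton] at hz2; subst hz2; exact hn y hy
        simp only [List.foldl_cons, if_pos hcond, hadd]
        exact ih (out ++ [n]) hrest ho' hinv'

-- Set.ofList keeps a subsequence of its argument (first occurrences in order)
theorem pv_foldl_add_sublist {α : Type} [DecidableEq α] :
    ∀ (xs out : List α), (xs.foldl PySem.Set.add out).Sublist (out ++ xs) := by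
  intro xs
  induction xs with
  | nil => intro out; simp
  | cons x xs ih =>
      intro out
      simp only [List.foldl_cons]
      have h := ih (PySem.Set.add out x)
      by_cases hmem : x ∈ out
      · have hx : PySem.Set.add out x = out := by simp [PySem.Set.add, hmem]
        rw [hx]
        refine (ih out).trans ?_
        refine List.Sublist.append_left ?_ out
        exact List.sublist_cons_self x xs
      · have hx : PySem.Set.add out x = out ++ [x] := by simp [PySem.Set.add, hmem]
        rw [hx] at h ⊢
        simpa using h

theorem pv_ofList_sublist {α : Type} [DecidableEq α] (xs : List α) :
    (PySem.Set.ofList xs).Sublist xs := by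
  rw [PySem.Set.ofList_eq_foldl]
  simpa using pv_foldl_add_sublist xs []

-- the heart of the equivalence: sorted(set(names)) = adjacent-dedup(sorted(names))
theorem pv_core (names : List String) :
    PySem.List.sorted (PySem.Set.ofList names) (fun x => x) false
    = (PySem.List.sorted names (fun x => x) false).foldl
        (fun out n => if out = [] ∨ out.getLast? ≠ some n then out ++ [n] else out) [] := by
  have hs : (PySem.List.sorted names (fun x => x) false).Pairwise (· ≤ ·) :=
    PySem.List.sorted_pairwise names (fun x => x)
  rw [pv_adj_eq_add _ [] hs (List.Pairwise.nil) (by intro y _ z hz; simp at hz),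
      ← PySem.Set.ofList_eq_foldl]
  have hnd1 : (PySem.Set.ofList (PySem.List.sorted names (fun x => x) false)).Nodup :=
    PySem.Set.nodup_ofList _
  have hnd2 : (PySem.Set.ofList names).Nodup := PySem.Set.nodup_ofList _
  have hperm : (PySem.Set.ofList (PySem.List.sorted names (fun x => x) false)).Perm
      (PySem.Set.ofList names) := by
    rw [List.perm_ext_iff_of_nodup hnd1 hnd2]
    intro a
    simp [PySem.Set.mem_ofList, PySem.List.mem_sorted]
  have hlt : (PySem.Set.ofList (PySem.List.sorted names (fun x => x) false)).Pairwise (· < ·) := by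
    have hle : (PySem.Set.ofList (PySem.List.sorted names (fun x => x) false)).Pairwise (· ≤ ·) :=
      hs.sublist (pv_ofList_sublist _)
    have hne : (PySem.Set.ofList (PySem.List.sorted names (fun x => x) false)).Pairwise (· ≠ ·) :=
      hnd1
    exact (hle.and hne).imp (fun h => lt_of_le_of_ne h.1 h.2)
  exact PySem.List.sorted_eq_of_perm_of_pairwise_lt _ _ _ hperm hlt

-- ===== VERDICT (by name: the statement is the Claim_ definition above) =====
theorem get_unique_names_spec : Claim_equal_get_unique_names := by
  intro mentors _
  simp only [Spec_get_unique_names, get_unique_names, get_unique_names_alt,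
    pv_names_eq, pv_core]
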